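-- pv_equiv track=rewrite | github.com/arun-8687/SupportAgent | src/agents/verification_agent.py | _determine_success
-- ===== SOURCE A (Python) =====
-- from typing import Any, Dict, List, Optional
--
-- def _determine_success(
--
--     checks: List[Dict[str, Any]]
-- ) -> bool:
--     """Determine overall verification success."""
--     if not checks:
--         return False
--
--     # Filter out skipped checks
--     active_checks = [c for c in checks if not c.get("skipped")]
--
--     if not active_checks:
--         # All checks were skipped, consider it a pass
--         return True
--
--     # Require majority of checks to pass
--     passed = sum(1 for c in active_checks if c.get("passed"))
--     required = len(active_checks) // 2 + 1
--
--     return passed >= required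
-- ===== SOURCE B (Python) =====
-- from typing import Any, Dict, List, Optional
--
-- def _net(checks: List[Dict[str, Any]]) -> Optional[int]:
--     """Signed vote balance of non-skipped checks (+1 passed, -1 failed);
--     None if every check is skipped."""
--     if not checks:
--         return None
--     c = checks[0]
--     tail = _net(checks[1:])
--     if c.get("skipped"):
--         return tail
--     d = 1 if c.get("passed") else -1
--     return d if tail is None else d + tail
--
-- def _determine_success(checks: List[Dict[str, Any]]) -> bool:
--     """Determine overall verification success (recursive signed-balance vote)."""
--     if not checks:
--         return False
--     net = _net(checks)
--     return True if net is None else net > 0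
-- ===== Notes on version B (the rewrite author's own statement) =====
-- stated objective: alternative
-- what changed: Replaces filter-then-count-and-threshold ('passed >= len//2+1') by a structural recursion computing a single signed vote balance (Optional int: +1 per passed active check, -1 per failed, None if all skipped), with success iff balance > 0; no intermediate list, no counts, no division.
import Mathlib
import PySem

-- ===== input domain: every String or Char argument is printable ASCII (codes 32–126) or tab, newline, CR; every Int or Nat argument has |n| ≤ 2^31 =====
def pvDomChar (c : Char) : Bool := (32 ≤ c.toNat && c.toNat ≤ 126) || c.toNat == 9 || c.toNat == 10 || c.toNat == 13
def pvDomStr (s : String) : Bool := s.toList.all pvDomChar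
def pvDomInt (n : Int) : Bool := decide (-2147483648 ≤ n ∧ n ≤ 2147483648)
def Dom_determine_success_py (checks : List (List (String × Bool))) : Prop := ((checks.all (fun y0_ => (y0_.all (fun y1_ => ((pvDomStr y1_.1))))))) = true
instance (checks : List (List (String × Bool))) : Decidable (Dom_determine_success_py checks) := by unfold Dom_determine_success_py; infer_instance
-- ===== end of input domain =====

-- B replaces A's filter-then-count-and-threshold by a structural recursion computing a
-- signed vote balance (Option Int: +1 per passed active check, -1 per failed, none if
-- all skipped), success iff the balance is positive (objective: alternative).

-- truthiness of c.get(key): None is falsy, a Bool value is itself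
def pvGetTruthy (c : List (String × Bool)) (k : String) : Bool :=
  ((PySem.Dict.mk c).get? k).getD false

-- ===== PORT A =====
def determine_success_py (checks : List (List (String × Bool))) : Bool :=
  if checks = [] then false
  else
    let active_checks := checks.filter (fun c => !pvGetTruthy c "skipped")
    if active_checks = [] then true
    else
      let passed : Int := active_checks.countP (fun c => pvGetTruthy c "passed")
      let required : Int := PySem.Int.floordiv (active_checks.length) 2 + 1
      decide (passed ≥ required)

-- ===== PORT B =====
-- signed vote balance of the non-skipped checks; none if every check is skipped
def pvNet : List (List (String × Bool)) → Option Int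
  | [] => none
  | c :: rest =>
    let tail := pvNet rest
    if pvGetTruthy c "skipped" then tail
    else
      let d : Int := if pvGetTruthy c "passed" then 1 else -1
      match tail with
      | none => some d
      | some t => some (d + t)

def determine_success_py_alt (checks : List (List (String × Bool))) : Bool :=
  if checks = [] then false
  else
    match pvNet checks with
    | none => true
    | some net => decide (net > 0)

-- ===== PRECONDITION & SPEC =====
def Spec_determine_success_py (checks : List (List (String × Bool))) (out : Bool) : Prop := out = determine_success_py_alt checks
instance (checks : List (List (String × Bool))) (out : Bool) : Decidable (Spec_determine_success_py checks out) := by unfold Spec_determine_success_py; infer_instance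

-- ===== CLAIM (what is proved, stated in full; the proofs are below) =====
def Claim_equal_determine_success_py : Prop := ∀ (checks : List (List (String × Bool))), Dom_determine_success_py checks → Spec_determine_success_py checks (determine_success_py checks)

-- ===== LEMMAS AND PROOFS =====

-- pvNet computes none when there is no active check, otherwise 2*#passed - #active
theorem pvNet_eq (l : List (List (String × Bool))) :
    pvNet l =
      if l.countP (fun c => !pvGetTruthy c "skipped") = 0 then none
      else some (2 * (l.countP (fun c => !pvGetTruthy c "skipped" && pvGetTruthy c "passed") : Int)
                 - (l.countP (fun c => !pvGetTruthy c "skipped") : Int)) := by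
  induction l with
  | nil => simp [pvNet]
  | cons c t ih =>
    rw [List.countP_cons, List.countP_cons]
    by_cases hs : pvGetTruthy c "skipped"
    · simp only [pvNet, hs, if_true, Bool.not_true, Bool.false_and]
      simpa using ih
    · have hle : t.countP (fun c => !pvGetTruthy c "skipped" && pvGetTruthy c "passed")
          ≤ t.countP (fun c => !pvGetTruthy c "skipped") :=
        List.countP_mono_left (fun a _ h => by
          simp only [Bool.and_eq_true] at h; exact h.1)
      by_cases hp : pvGetTruthy c "passed" <;>
        · simp only [pvNet, hs, hp, Bool.not_false, Bool.true_and, ih]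
          by_cases h0 : t.countP (fun c => !pvGetTruthy c "skipped") = 0 <;>
            simp [h0] <;> push_cast <;> omega

-- ===== VERDICT (by name: the statement is the Claim_ definition above) =====
theorem determine_success_py_spec : Claim_equal_determine_success_py := by
  intro checks _
  unfold Spec_determine_success_py determine_success_py determine_success_py_alt
  by_cases hnil : checks = []
  · simp [hnil]
  · simp only [hnil, if_false]
    rw [pvNet_eq]
    have hc : (checks.filter (fun c => !pvGetTruthy c "skipped")).countP
        (fun c => pvGetTruthy c "passed")
        = checks.countP (fun c => !pvGetTruthy c "skipped" && pvGetTruthy c "passed") := by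
      rw [List.countP_filter]
      congr 1
      funext c
      by_cases hs : pvGetTruthy c "skipped" <;> by_cases hp : pvGetTruthy c "passed" <;>
        simp [hs, hp]
    have hlen : (checks.filter (fun c => !pvGetTruthy c "skipped")).length
        = checks.countP (fun c => !pvGetTruthy c "skipped") :=
      (List.countP_eq_length_filter).symm
    by_cases hact : checks.filter (fun c => !pvGetTruthy c "skipped") = []
    · have h0 : checks.countP (fun c => !pvGetTruthy c "skipped") = 0 := by
        rw [List.countP_eq_length_filter]; simp [hact]
      simp [hact, h0]
    · have hpos : 0 < checks.countP (fun c => !pvGetTruthy c "skipped") := by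
        rw [← hlen]; exact List.length_pos_iff.mpr hact
      simp only [hact, if_false, hc, hlen, hpos.ne', if_false]
      set n : Nat := checks.countP (fun c => !pvGetTruthy c "skipped")
      set p : Nat := checks.countP (fun c => !pvGetTruthy c "skipped" && pvGetTruthy c "passed")
      rw [PySem.Int.floordiv_eq_ediv_of_pos (by norm_num)]
      simp only [decide_eq_decide, ge_iff_le, gt_iff_lt]
      omega
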